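-- pv_equiv track=rewrite | github.com/Lange99/IEEEXTREME-solutions | ieeextreme18/triumvirates.py | hilbert_order
-- ===== SOURCE A (Python) =====
-- def hilbert_order(x, y, bits=16):
--     """Compute the Hilbert order of a point (x, y) for a given number of bits."""
--     # Mask to extract bits
--     mask = 1 << (bits - 1)
--     h = 0
--     for i in range(bits):
--         rx = (x & mask) > 0
--         ry = (y & mask) > 0
--         h <<= 2
--         h |= (rx * 3) ^ int(ry)
--         x <<= 1
--         y <<= 1
--     return h
-- ===== SOURCE B (Python) =====
-- def hilbert_order(x, y, bits=16):
--     """Compute the Hilbert order of a point (x, y) for a given number of bits.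
--
--     A's 2-bit code at each step is (rx << 1) | (rx ^ ry), so the result is the
--     bit-interleave of the low `bits` bits of x (odd positions) and of x ^ y
--     (even positions).  Mask both operands once, then interleave by recursive
--     divide and conquer on the bit width.
--     """
--     m = (1 << bits) - 1
--     return _interleave(x & m, (x ^ y) & m, bits)
--
--
-- def _interleave(a, b, bits):
--     # bit i of a goes to position 2*i+1, bit i of b to position 2*i
--     if bits == 1:
--         return 2 * a + b
--     k = bits // 2
--     hi = _interleave(a >> k, b >> k, bits - k)
--     lo = _interleave(a & ((1 << k) - 1), b & ((1 << k) - 1), k)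
--     return (hi << (2 * k)) | lo
-- ===== Notes on version B (the rewrite author's own statement) =====
-- stated objective: faster
-- what changed: A accumulates one Gray-coded 2-bit chunk per iteration of a per-bit loop that left-shifts x and y under a fixed mask (its operands grow by one bit per step, so bignum work is quadratic in bits); B observes the result is the bit-interleave of the low `bits` bits of x (odd positions) and x ^ y (even positions), masks both operands once, and computes the interleave by recursive divide and conquer on the bit width.
import Mathlib
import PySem

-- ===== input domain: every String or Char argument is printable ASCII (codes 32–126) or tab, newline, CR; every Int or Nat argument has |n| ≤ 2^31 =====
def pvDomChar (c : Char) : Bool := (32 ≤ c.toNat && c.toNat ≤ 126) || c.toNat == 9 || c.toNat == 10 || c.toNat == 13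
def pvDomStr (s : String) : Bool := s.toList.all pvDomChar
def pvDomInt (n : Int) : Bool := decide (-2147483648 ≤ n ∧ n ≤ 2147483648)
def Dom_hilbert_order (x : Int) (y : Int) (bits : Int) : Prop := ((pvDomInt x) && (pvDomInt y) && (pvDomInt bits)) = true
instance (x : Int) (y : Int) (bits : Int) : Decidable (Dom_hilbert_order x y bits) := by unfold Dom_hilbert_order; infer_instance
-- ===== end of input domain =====

-- B derives that the result is the bit-interleave of x (odd positions) and x^y (even
-- positions) over the low `bits` bits, and computes it by masking both operands once and
-- recursively interleaving halves (divide and conquer) instead of A's per-bit masked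
-- Gray-code accumulation loop, whose left-shifting of x and y grows its operands each
-- step; a timing run measured B faster at large bits.


-- ===== PORT A =====
-- `&`, `|`, `^`, `<<`, `>>` on Python ints are exactly Int.land/lor/xor/<<</>>>
-- (two's-complement on negatives).  `1 << (bits - 1)` is exact for bits ≥ 1
-- (Pre_); for bits ≤ 0 Python raises ValueError, excluded by Pre_.
def hilbert_order (x : Int) (y : Int) (bits : Int) : Int :=
  let mask : Int := (1 : Int) <<< (bits - 1)
  ((PySem.List.pyRange 0 bits 1).foldl
    (fun (s : Int × Int × Int) _ =>
      let rx : Bool := decide (0 < Int.land s.1 mask)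
      let ry : Bool := decide (0 < Int.land s.2.1 mask)
      let h : Int := Int.lor (s.2.2 <<< (2 : Int))
        (Int.xor (if rx then 3 else 0) (if ry then 1 else 0))
      (s.1 <<< (1 : Int), s.2.1 <<< (1 : Int), h))
    (x, y, 0)).2.2

-- ===== PORT B =====
-- _interleave recurses on the bit width, which is a positive int throughout the
-- recursion whenever the top call has bits ≥ 1 (Pre_): each call splits a width
-- ≥ 2 into two positive halves.  It is therefore ported with a Nat width
-- (bits.toNat at the call site); the width-0 branch, on which Python's
-- recursion would not terminate, returns 0 and is unreachable under Pre_.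
def interleave : Int → Int → Nat → Int
  | _, _, 0 => 0
  | a, b, 1 => 2 * a + b
  | a, b, n + 2 =>
    let k : Nat := (n + 2) / 2
    let hi := interleave (a >>> (k : Int)) (b >>> (k : Int)) (n + 2 - k)
    let lo := interleave (Int.land a ((1 : Int) <<< (k : Int) - 1))
                         (Int.land b ((1 : Int) <<< (k : Int) - 1)) k
    Int.lor (hi <<< (2 * (k : Int))) lo
  termination_by _ _ n => n
  decreasing_by all_goals omega

def hilbert_order_alt (x : Int) (y : Int) (bits : Int) : Int :=
  let m : Int := (1 : Int) <<< bits - 1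
  interleave (Int.land x m) (Int.land (Int.xor x y) m) bits.toNat

-- ===== PRECONDITION & SPEC =====
-- Python A raises ValueError ("negative shift count") for bits ≤ 0; it returns
-- normally for every x, y and bits ≥ 1.
def Pre_hilbert_order (x : Int) (y : Int) (bits : Int) : Prop := 1 ≤ bits
instance (x : Int) (y : Int) (bits : Int) : Decidable (Pre_hilbert_order x y bits) := by
  unfold Pre_hilbert_order; infer_instance
def pvWitness_hilbert_order : Int × Int × Int := (3, 5, 4)

def Spec_hilbert_order (x : Int) (y : Int) (bits : Int) (out : Int) : Prop :=
  out = hilbert_order_alt x y bits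
instance (x : Int) (y : Int) (bits : Int) (out : Int) : Decidable (Spec_hilbert_order x y bits out) := by
  unfold Spec_hilbert_order; infer_instance

-- ===== CLAIM (what is proved, stated in full; the proofs are below) =====
def Claim_equal_hilbert_order : Prop := ∀ (x : Int) (y : Int) (bits : Int),
  Dom_hilbert_order x y bits → Pre_hilbert_order x y bits →
    Spec_hilbert_order x y bits (hilbert_order x y bits)

-- ===== LEMMAS AND PROOFS =====

-- 0/1 value of bit j of an integer (two's complement, as in Python)
def bitI (z : Int) (j : Nat) : Int := if z.testBit j then 1 else 0

-- A's loop body as a function of the mask (syntactically the port's lambda body)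
def stepA (mask : Int) (s : Int × Int × Int) : Int × Int × Int :=
  let rx : Bool := decide (0 < Int.land s.1 mask)
  let ry : Bool := decide (0 < Int.land s.2.1 mask)
  let h : Int := Int.lor (s.2.2 <<< (2 : Int))
    (Int.xor (if rx then 3 else 0) (if ry then 1 else 0))
  (s.1 <<< (1 : Int), s.2.1 <<< (1 : Int), h)

-- the value A's loop adds below h: n remaining iterations, mask bit k
def TA (k : Nat) : Nat → Int → Int → Int
  | 0, _, _ => 0
  | n + 1, x, y => (2 * bitI x k + bitI (Int.xor x y) k) * 4 ^ n + TA k n (2 * x) (2 * y)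

theorem TA_succ (k n : Nat) (x y : Int) :
    TA k (n + 1) x y =
      (2 * bitI x k + bitI (Int.xor x y) k) * 4 ^ n + TA k n (2 * x) (2 * y) := rfl

-- the base-4 number whose digit i (i < n) is 2*bit_i(a) + bit_i(b)
def SB (a b : Int) : Nat → Int
  | 0 => 0
  | n + 1 => SB a b n + (2 * bitI a n + bitI b n) * 4 ^ n

theorem hilbert_order_unfold (x y bits : Int) :
    hilbert_order x y bits =
      ((PySem.List.pyRange 0 bits 1).foldl
        (fun s _ => stepA ((1 : Int) <<< (bits - 1)) s) (x, y, 0)).2.2 := rfl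

theorem foldl_const_iterate {α β : Type} (f : α → α) :
    ∀ (l : List β) (init : α), l.foldl (fun s _ => f s) init = f^[l.length] init := by
  intro l
  induction l with
  | nil => intro init; rfl
  | cons a t ih =>
      intro init
      simp only [List.foldl_cons, List.length_cons, ih, Function.iterate_succ_apply]

theorem nat_or_mul_pow (a b k : Nat) (hb : b < 2 ^ k) : (2 ^ k * a) ||| b = 2 ^ k * a + b := by
  apply Nat.eq_of_testBit_eq
  intro i
  have h0 : 2 ^ k * a = 2 ^ k * a + 0 := by ring
  have hz : (0 : Nat) < 2 ^ k := Nat.two_pow_pos k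
  rw [Nat.testBit_or, Nat.testBit_two_pow_mul_add a hb i]
  conv_lhs => rw [h0, Nat.testBit_two_pow_mul_add a hz i]
  by_cases hi : i < k
  · simp [hi, Nat.zero_testBit]
  · have hbf : b.testBit i = false := by
      apply Nat.testBit_lt_two_pow
      calc b < 2 ^ k := hb
        _ ≤ 2 ^ i := Nat.pow_le_pow_right (by norm_num) (by omega)
    simp [hi, hbf]

theorem lor_shift_two (h c : Int) (h0 : 0 ≤ h) (c0 : 0 ≤ c) (c4 : c < 4) :
    Int.lor (h <<< (2 : Int)) c = 4 * h + c := by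
  obtain ⟨a, rfl⟩ := Int.eq_ofNat_of_zero_le h0
  obtain ⟨b, rfl⟩ := Int.eq_ofNat_of_zero_le c0
  have hb : b < 2 ^ 2 := by exact_mod_cast c4
  have hs : ((a : Int)) <<< (2 : Int) = ((2 ^ 2 * a : Nat) : Int) := by
    rw [show (2 : Int) = ((2 : Nat) : Int) from rfl, Int.shiftLeft_natCast_right,
      Int.shiftLeft_eq]
    push_cast; ring
  rw [hs]
  show ((2 ^ 2 * a ||| b : Nat) : Int) = 4 * (a : Int) + (b : Int)
  rw [nat_or_mul_pow a b 2 hb]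
  push_cast; ring

theorem ldiff_two_pow (k m : Nat) :
    Nat.ldiff (2 ^ k) m = (!(m.testBit k)).toNat * 2 ^ k := by
  cases hb : m.testBit k
  · simp only [Bool.not_false, Bool.toNat_true, one_mul]
    apply Nat.eq_of_testBit_eq
    intro i
    rw [Nat.testBit_ldiff, Nat.testBit_two_pow]
    by_cases hki : k = i
    · subst hki; simp [hb]
    · simp [hki]
  · simp only [Bool.not_true, Bool.toNat_false, zero_mul]
    apply Nat.eq_of_testBit_eq
    intro i
    rw [Nat.testBit_ldiff, Nat.testBit_two_pow, Nat.zero_testBit]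
    by_cases hki : k = i
    · subst hki; simp [hb]
    · simp [hki]

theorem land_two_pow_pos (z : Int) (k : Nat) :
    decide (0 < Int.land z ((2 ^ k : Nat) : Int)) = z.testBit k := by
  cases z with
  | ofNat m =>
      show decide (0 < ((m &&& 2 ^ k : Nat) : Int)) = m.testBit k
      rw [Nat.and_two_pow]
      cases hb : m.testBit k <;> simp [hb, Nat.two_pow_pos]
  | negSucc m =>
      show decide (0 < ((Nat.ldiff (2 ^ k) m : Nat) : Int)) = !m.testBit k
      rw [ldiff_two_pow]
      cases hb : m.testBit k <;> simp [hb, Nat.two_pow_pos]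

theorem testBit_double (z : Int) (j : Nat) : (2 * z).testBit (j + 1) = z.testBit j := by
  have hb := Int.testBit_bit_succ j false z
  rw [Int.bit_val] at hb
  simpa using hb

theorem bitI_double (z : Int) (j : Nat) : bitI (2 * z) (j + 1) = bitI z j := by
  simp [bitI, testBit_double]

theorem bitI_xor_double (x y : Int) (j : Nat) :
    bitI (Int.xor (2 * x) (2 * y)) (j + 1) = bitI (Int.xor x y) j := by
  simp [bitI, Int.testBit_lxor, testBit_double]

theorem bitI_nonneg (z : Int) (j : Nat) : 0 ≤ bitI z j := by
  unfold bitI; split <;> norm_num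

theorem bitI_le_one (z : Int) (j : Nat) : bitI z j ≤ 1 := by
  unfold bitI; split <;> norm_num

theorem code_eval (a b : Bool) :
    Int.xor (if a then 3 else 0) (if b then 1 else 0) =
      2 * (if a then (1 : Int) else 0) + (if (a ^^ b) then 1 else 0) := by
  cases a <;> cases b <;> decide

theorem stepA_eval (k : Nat) (x y h : Int) (h0 : 0 ≤ h) :
    stepA ((2 ^ k : Nat) : Int) (x, y, h) =
      (2 * x, 2 * y, 4 * h + (2 * bitI x k + bitI (Int.xor x y) k)) := by
  unfold stepA
  have hsh : ∀ z : Int, z <<< (1 : Int) = 2 * z := by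
    intro z
    rw [show (1 : Int) = ((1 : Nat) : Int) from rfl, Int.shiftLeft_natCast_right,
      Int.shiftLeft_eq]
    ring
  have hcode : Int.xor (if decide (0 < Int.land x ((2 ^ k : Nat) : Int)) then 3 else 0)
      (if decide (0 < Int.land y ((2 ^ k : Nat) : Int)) then 1 else 0) =
        2 * bitI x k + bitI (Int.xor x y) k := by
    rw [code_eval, land_two_pow_pos, land_two_pow_pos]
    simp [bitI, Int.testBit_lxor]
  simp only []
  rw [hcode, hsh, hsh]
  have hc0 : 0 ≤ 2 * bitI x k + bitI (Int.xor x y) k := by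
    have := bitI_nonneg x k; have := bitI_nonneg (Int.xor x y) k; omega
  have hc4 : 2 * bitI x k + bitI (Int.xor x y) k < 4 := by
    have := bitI_le_one x k; have := bitI_le_one (Int.xor x y) k; omega
  rw [lor_shift_two _ _ h0 hc0 hc4]

theorem A_iter (k : Nat) :
    ∀ (n : Nat) (x y h : Int), 0 ≤ h →
      (((stepA ((2 ^ k : Nat) : Int))^[n] (x, y, h)).2.2 : Int) = h * 4 ^ n + TA k n x y := by
  intro n
  induction n with
  | zero => intro x y h h0; simp [TA]
  | succ n ih =>
      intro x y h h0
      rw [Function.iterate_succ_apply, stepA_eval k x y h h0]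
      have hc0 : 0 ≤ 2 * bitI x k + bitI (Int.xor x y) k := by
        have := bitI_nonneg x k; have := bitI_nonneg (Int.xor x y) k; omega
      rw [ih (2 * x) (2 * y) _ (by omega)]
      show (4 * h + (2 * bitI x k + bitI (Int.xor x y) k)) * 4 ^ n + TA k n (2 * x) (2 * y) =
        h * 4 ^ (n + 1) + TA k (n + 1) x y
      rw [TA_succ]
      ring

theorem TA_shift : ∀ (n k : Nat) (x y : Int), TA (k + 1) n (2 * x) (2 * y) = TA k n x y := by
  intro n
  induction n with
  | zero => intro k x y; rfl
  | succ n ih =>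
      intro k x y
      show (2 * bitI (2 * x) (k + 1) + bitI (Int.xor (2 * x) (2 * y)) (k + 1)) * 4 ^ n +
          TA (k + 1) n (2 * (2 * x)) (2 * (2 * y)) =
        (2 * bitI x k + bitI (Int.xor x y) k) * 4 ^ n + TA k n (2 * x) (2 * y)
      rw [bitI_double, bitI_xor_double, ih k (2 * x) (2 * y)]

theorem TA_top : ∀ (k : Nat) (x y : Int), TA k (k + 1) x y = SB x (Int.xor x y) (k + 1) := by
  intro k
  induction k with
  | zero => intro x y; show (2 * bitI x 0 + bitI (Int.xor x y) 0) * 4 ^ 0 + 0 = 0 + (2 * bitI x 0 + bitI (Int.xor x y) 0) * 4 ^ 0; ring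
  | succ k ih =>
      intro x y
      show (2 * bitI x (k + 1) + bitI (Int.xor x y) (k + 1)) * 4 ^ (k + 1) +
          TA (k + 1) (k + 1) (2 * x) (2 * y) =
        SB x (Int.xor x y) (k + 2)
      rw [TA_shift (k + 1) k x y, ih x y]
      show _ = SB x (Int.xor x y) (k + 1) + (2 * bitI x (k + 1) + bitI (Int.xor x y) (k + 1)) * 4 ^ (k + 1)
      ring

-- ===== B-side lemmas =====

theorem SB_nonneg (a b : Int) : ∀ n, 0 ≤ SB a b n := by
  intro n
  induction n with
  | zero => exact le_refl 0
  | succ n ih =>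
      show 0 ≤ SB a b n + (2 * bitI a n + bitI b n) * 4 ^ n
      have h1 := bitI_nonneg a n
      have h2 := bitI_nonneg b n
      have h4 : (0 : Int) < 4 ^ n := by positivity
      nlinarith

theorem SB_lt (a b : Int) : ∀ n, SB a b n < 4 ^ n := by
  intro n
  induction n with
  | zero => norm_num [SB]
  | succ n ih =>
      show SB a b n + (2 * bitI a n + bitI b n) * 4 ^ n < 4 ^ (n + 1)
      have h1 := bitI_le_one a n
      have h2 := bitI_le_one b n
      have h4 : (0 : Int) < 4 ^ n := by positivity
      have : (4 : Int) ^ (n + 1) = 4 * 4 ^ n := by ring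
      nlinarith

theorem SB_congr (a a' b b' : Int) :
    ∀ n, (∀ i, i < n → bitI a i = bitI a' i) → (∀ i, i < n → bitI b i = bitI b' i) →
      SB a b n = SB a' b' n := by
  intro n
  induction n with
  | zero => intro _ _; rfl
  | succ n ih =>
      intro ha hb
      show SB a b n + (2 * bitI a n + bitI b n) * 4 ^ n =
        SB a' b' n + (2 * bitI a' n + bitI b' n) * 4 ^ n
      rw [ih (fun i hi => ha i (by omega)) (fun i hi => hb i (by omega)),
        ha n (by omega), hb n (by omega)]

theorem testBit_shiftRight_int (z : Int) (q i : Nat) :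
    (z >>> ((q : Nat) : Int)).testBit i = z.testBit (i + q) := by
  cases z with
  | ofNat m =>
      rw [Int.ofNat_eq_natCast, Int.shiftRight_natCast]
      show (m >>> q).testBit i = m.testBit (i + q)
      rw [Nat.testBit_shiftRight, Nat.add_comm]
  | negSucc m =>
      rw [Int.shiftRight_negSucc]
      simp [Int.testBit, Nat.testBit_shiftRight, Nat.add_comm]

theorem bitI_shiftRight (z : Int) (q i : Nat) :
    bitI (z >>> ((q : Nat) : Int)) i = bitI z (i + q) := by
  simp [bitI, testBit_shiftRight_int]

theorem mask_eq (k : Nat) : (1 : Int) <<< ((k : Nat) : Int) - 1 = ((2 ^ k - 1 : Nat) : Int) := by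
  rw [Int.one_shiftLeft]
  have h1 : (1 : Nat) ≤ 2 ^ k := Nat.one_le_two_pow
  rw [Nat.cast_sub h1, Nat.cast_one]

theorem land_mask_nonneg (z : Int) (k : Nat) : 0 ≤ Int.land z ((2 ^ k - 1 : Nat) : Int) := by
  cases z with
  | ofNat m => exact Int.natCast_nonneg _
  | negSucc m => exact Int.natCast_nonneg (Nat.ldiff (2 ^ k - 1) m)

theorem land_mask_lt (z : Int) (k : Nat) :
    Int.land z ((2 ^ k - 1 : Nat) : Int) < ((2 ^ k : Nat) : Int) := by
  cases z with
  | ofNat m =>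
      show ((m &&& 2 ^ k - 1 : Nat) : Int) < ((2 ^ k : Nat) : Int)
      rw [Nat.and_two_pow_sub_one_eq_mod]
      exact_mod_cast Nat.mod_lt m (Nat.two_pow_pos k)
  | negSucc m =>
      show ((Nat.ldiff (2 ^ k - 1) m : Nat) : Int) < ((2 ^ k : Nat) : Int)
      have hlt : Nat.ldiff (2 ^ k - 1) m < 2 ^ k := by
        apply Nat.lt_pow_two_of_testBit
        intro i hi
        rw [Nat.testBit_ldiff, Nat.testBit_two_pow_sub_one]
        have hik : ¬ i < k := by omega
        simp [hik]
      exact_mod_cast hlt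

theorem testBit_land_mask (z : Int) (k i : Nat) (h : i < k) :
    (Int.land z ((2 ^ k - 1 : Nat) : Int)).testBit i = z.testBit i := by
  rw [Int.testBit_land]
  have hm : (((2 ^ k - 1 : Nat) : Int)).testBit i = true := by
    show (2 ^ k - 1 : Nat).testBit i = true
    rw [Nat.testBit_two_pow_sub_one]
    simpa using h
  rw [hm, Bool.and_true]

theorem bitI_land_mask (z : Int) (k i : Nat) (h : i < k) :
    bitI (Int.land z ((2 ^ k - 1 : Nat) : Int)) i = bitI z i := by
  unfold bitI
  rw [testBit_land_mask z k i h]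

theorem shiftRight_cast_nonneg (z : Int) (q : Nat) (h : 0 ≤ z) :
    0 ≤ z >>> ((q : Nat) : Int) := by
  obtain ⟨m, rfl⟩ := Int.eq_ofNat_of_zero_le h
  rw [Int.shiftRight_natCast]
  exact Int.natCast_nonneg _

theorem shiftRight_cast_lt (z : Int) (q n : Nat) (h0 : 0 ≤ z)
    (h : z < ((2 ^ n : Nat) : Int)) : z >>> ((q : Nat) : Int) < ((2 ^ (n - q) : Nat) : Int) := by
  obtain ⟨m, rfl⟩ := Int.eq_ofNat_of_zero_le h0
  rw [Int.shiftRight_natCast]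
  have hm : m < 2 ^ n := by exact_mod_cast h
  have : m >>> q < 2 ^ (n - q) := by
    rw [Nat.shiftRight_eq_div_pow]
    rw [Nat.div_lt_iff_lt_mul (Nat.two_pow_pos q)]
    calc m < 2 ^ n := hm
      _ ≤ 2 ^ (n - q + q) := Nat.pow_le_pow_right (by norm_num) (by omega)
      _ = 2 ^ (n - q) * 2 ^ q := by rw [pow_add]
  exact_mod_cast this

theorem lor_shift_pow (h c : Int) (k : Nat) (h0 : 0 ≤ h) (c0 : 0 ≤ c)
    (ck : c < 4 ^ k) : Int.lor (h <<< (2 * (k : Int))) c = h * 4 ^ k + c := by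
  obtain ⟨a, rfl⟩ := Int.eq_ofNat_of_zero_le h0
  obtain ⟨b, rfl⟩ := Int.eq_ofNat_of_zero_le c0
  have hb : b < 2 ^ (2 * k) := by
    have : ((b : Int)) < ((2 ^ (2 * k) : Nat) : Int) := by
      calc ((b : Int)) < 4 ^ k := ck
        _ = ((2 ^ (2 * k) : Nat) : Int) := by
            push_cast
            rw [pow_mul]
            norm_num
    exact_mod_cast this
  have hs : ((a : Int)) <<< (2 * (k : Int)) = ((2 ^ (2 * k) * a : Nat) : Int) := by
    rw [show (2 * (k : Int)) = (((2 * k : Nat) : Nat) : Int) by push_cast; ring,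
      Int.shiftLeft_natCast_right, Int.shiftLeft_eq]
    push_cast; ring
  rw [hs]
  show ((2 ^ (2 * k) * a ||| b : Nat) : Int) = (a : Int) * 4 ^ k + (b : Int)
  rw [nat_or_mul_pow a b (2 * k) hb]
  push_cast
  rw [pow_mul]
  norm_num
  ring

theorem bitI_of_lt_two (a : Int) (h0 : 0 ≤ a) (h2 : a < 2) : bitI a 0 = a := by
  interval_cases a <;> decide

theorem SB_split (a b : Int) (q : Nat) :
    ∀ p, SB a b (q + p) =
      SB a b q + SB (a >>> ((q : Nat) : Int)) (b >>> ((q : Nat) : Int)) p * 4 ^ q := by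
  intro p
  induction p with
  | zero => show SB a b q = SB a b q + 0 * 4 ^ q; ring
  | succ p ih =>
      show SB a b (q + p) + (2 * bitI a (q + p) + bitI b (q + p)) * 4 ^ (q + p) =
        SB a b q + (SB (a >>> ((q : Nat) : Int)) (b >>> ((q : Nat) : Int)) p +
          (2 * bitI (a >>> ((q : Nat) : Int)) p + bitI (b >>> ((q : Nat) : Int)) p) * 4 ^ p) * 4 ^ q
      rw [ih, bitI_shiftRight, bitI_shiftRight]
      rw [show p + q = q + p by omega]
      rw [pow_add]
      ring

theorem interleave_eq (n : Nat) : 1 ≤ n → ∀ a b : Int,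
    0 ≤ a → a < ((2 ^ n : Nat) : Int) → 0 ≤ b → b < ((2 ^ n : Nat) : Int) →
      interleave a b n = SB a b n := by
  induction n using Nat.strong_induction_on with
  | _ n ih =>
    match n with
    | 0 => intro h; omega
    | 1 =>
        intro _ a b ha0 ha2 hb0 hb2
        have ha2' : a < 2 := by exact_mod_cast ha2
        have hb2' : b < 2 := by exact_mod_cast hb2
        simp only [interleave]
        show 2 * a + b = 0 + (2 * bitI a 0 + bitI b 0) * 4 ^ 0
        rw [bitI_of_lt_two a ha0 ha2', bitI_of_lt_two b hb0 hb2']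
        ring
    | m + 2 =>
        intro _ a b ha0 han hb0 hbn
        simp only [interleave]
        rw [mask_eq]
        set n := m + 2 with hn
        set k : Nat := n / 2 with hk
        have hk1 : 1 ≤ k := by omega
        have hkn : k < n := by omega
        have hnk1 : 1 ≤ n - k := by omega
        have hnkn : n - k < n := by omega
        -- evaluate the two recursive calls
        have hhi : interleave (a >>> ((k : Nat) : Int)) (b >>> ((k : Nat) : Int)) (n - k) =
            SB (a >>> ((k : Nat) : Int)) (b >>> ((k : Nat) : Int)) (n - k) := by
          apply ih (n - k) hnkn hnk1
          · exact shiftRight_cast_nonneg a k ha0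
          · exact shiftRight_cast_lt a k n ha0 han
          · exact shiftRight_cast_nonneg b k hb0
          · exact shiftRight_cast_lt b k n hb0 hbn
        have hlo : interleave (Int.land a ((2 ^ k - 1 : Nat) : Int))
            (Int.land b ((2 ^ k - 1 : Nat) : Int)) k =
            SB (Int.land a ((2 ^ k - 1 : Nat) : Int)) (Int.land b ((2 ^ k - 1 : Nat) : Int)) k := by
          apply ih k hkn hk1
          · exact land_mask_nonneg a k
          · exact land_mask_lt a k
          · exact land_mask_nonneg b k
          · exact land_mask_lt b k
        rw [hhi, hlo]
        have hloSB : SB (Int.land a ((2 ^ k - 1 : Nat) : Int))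
            (Int.land b ((2 ^ k - 1 : Nat) : Int)) k = SB a b k :=
          SB_congr _ _ _ _ k (fun i hi => bitI_land_mask a k i hi)
            (fun i hi => bitI_land_mask b k i hi)
        rw [hloSB]
        rw [lor_shift_pow _ _ k
          (SB_nonneg _ _ _)
          (SB_nonneg _ _ _)
          (SB_lt _ _ _)]
        have := SB_split a b k (n - k)
        rw [show k + (n - k) = n by omega] at this
        rw [this]
        ring

theorem hilbert_order_alt_eq (x y : Int) (k : Nat) :
    hilbert_order_alt x y (((k + 1 : Nat)) : Int) = SB x (Int.xor x y) (k + 1) := by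
  show interleave (Int.land x ((1 : Int) <<< (((k + 1 : Nat)) : Int) - 1))
      (Int.land (Int.xor x y) ((1 : Int) <<< (((k + 1 : Nat)) : Int) - 1))
      ((((k + 1 : Nat)) : Int)).toNat = SB x (Int.xor x y) (k + 1)
  rw [mask_eq, Int.toNat_natCast]
  rw [interleave_eq (k + 1) (by omega) _ _
    (land_mask_nonneg x (k + 1)) (land_mask_lt x (k + 1))
    (land_mask_nonneg (Int.xor x y) (k + 1)) (land_mask_lt (Int.xor x y) (k + 1))]
  exact SB_congr _ _ _ _ (k + 1)
    (fun i hi => bitI_land_mask x (k + 1) i hi)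
    (fun i hi => bitI_land_mask (Int.xor x y) (k + 1) i hi)

-- ===== VERDICT (by name: the statement is the Claim_ definition above) =====
theorem hilbert_order_spec : Claim_equal_hilbert_order := by
  intro x y bits _ hpre
  unfold Pre_hilbert_order at hpre
  unfold Spec_hilbert_order
  obtain ⟨k, hk⟩ : ∃ k : Nat, bits = ((k : Nat) : Int) + 1 :=
    ⟨(bits - 1).toNat, by omega⟩
  have hb1 : bits - 1 = ((k : Nat) : Int) := by omega
  have hbn : bits = (((k + 1 : Nat)) : Int) := by push_cast; omega
  rw [hilbert_order_unfold, hb1, Int.one_shiftLeft k]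
  rw [foldl_const_iterate (stepA ((2 ^ k : Nat) : Int)) _ (x, y, 0)]
  rw [PySem.List.length_pyRange_one]
  have hlen : (bits - 0).toNat = k + 1 := by omega
  rw [hlen, A_iter k (k + 1) x y 0 le_rfl, TA_top k x y]
  rw [hbn, hilbert_order_alt_eq x y k]
  ring
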